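-- pv_equiv track=rewrite | github.com/zeeshan4002911/DSA-reloaded | 1.data-structure/2.string/easy/camelcase-conversion.py | camecase_conversion
-- ===== SOURCE A (Python) =====
-- def camecase_conversion(s):
--     result = ""
--     encounter_space_flag = False
--     for ele in s:
--         if ele == ' ':
--             encounter_space_flag = True
--             continue
--         if encounter_space_flag:
--             result += str(ele).upper()
--             encounter_space_flag = False
--         else:
--             result += ele
--
--     return result
-- ===== SOURCE B (Python) =====
-- def camecase_conversion(s):
--     parts = s.split(' ')
--     return parts[0] + ''.join(p[:1].upper() + p[1:] for p in parts[1:])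
-- ===== Notes on version B (the rewrite author's own statement) =====
-- stated objective: simpler
-- what changed: Replaces the char-by-char loop with a space-seen flag by token-level processing: split on the space character, keep the first piece verbatim, uppercase the first character of each later piece and join.
import Mathlib
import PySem

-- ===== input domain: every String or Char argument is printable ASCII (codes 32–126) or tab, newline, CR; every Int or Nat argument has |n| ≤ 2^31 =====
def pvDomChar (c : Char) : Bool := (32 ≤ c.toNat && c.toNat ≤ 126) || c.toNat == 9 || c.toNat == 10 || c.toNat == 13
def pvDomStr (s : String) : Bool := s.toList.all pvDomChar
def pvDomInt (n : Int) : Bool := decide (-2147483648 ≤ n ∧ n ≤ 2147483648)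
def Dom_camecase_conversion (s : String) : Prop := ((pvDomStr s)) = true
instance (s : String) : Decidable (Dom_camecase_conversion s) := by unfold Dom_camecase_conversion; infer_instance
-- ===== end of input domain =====

-- B replaces A's char-by-char loop with a space-seen flag by token-level processing
-- (split on ' ', keep the first piece, uppercase the first char of each later piece, join): simpler.

-- ===== PORT A =====
-- loop state = (result, encounter_space_flag); 'str(ele).upper()' is PySem.Chars.upper on the one-char string
def camecase_conversion (s : String) : String :=
  String.ofList
    ((s.toList.foldl
      (fun (st : List Char × Bool) ele =>
        if ele = ' ' then (st.1, true)
        else if st.2 then (st.1 ++ PySem.Chars.upper [ele], false)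
        else (st.1 ++ [ele], st.2)) ([], false)).1)

-- ===== PORT B =====
-- parts = s.split(' '); parts[0] + ''.join(p[:1].upper() + p[1:] for p in parts[1:])
-- (split(' ') never returns an empty list, so parts[0] is total: headD)
def camecase_conversion_alt (s : String) : String :=
  String.ofList
    ((PySem.Chars.splitOn s.toList [' ']).headD [] ++
      PySem.Chars.join [] (((PySem.Chars.splitOn s.toList [' ']).drop 1).map (fun p =>
        PySem.Chars.upper (PySem.Chars.slice p (some 0) (some 1)) ++ PySem.Chars.slice p (some 1) none)))

-- ===== PRECONDITION & SPEC =====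
def Spec_camecase_conversion (s : String) (out : String) : Prop := out = camecase_conversion_alt s
instance (s : String) (out : String) : Decidable (Spec_camecase_conversion s out) := by unfold Spec_camecase_conversion; infer_instance

-- ===== CLAIM (what is proved, stated in full; the proofs are below) =====
def Claim_equal_camecase_conversion : Prop := ∀ (s : String), Dom_camecase_conversion s → Spec_camecase_conversion s (camecase_conversion s)

-- ===== LEMMAS AND PROOFS =====

-- structural characterisation of split on a single space
def pvSpl : List Char → List (List Char)
  | [] => [[]]
  | c :: t => if c = ' ' then [] :: pvSpl t else (pvSpl t).modifyHead (c :: ·)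

-- what A's loop appends from a given flag onwards
def pvG : Bool → List Char → List Char
  | _, [] => []
  | flag, c :: t =>
      if c = ' ' then pvG true t
      else if flag then PySem.Chars.upper [c] ++ pvG false t
      else c :: pvG false t

-- B's per-token transform, exactly as in the port
def pvUpF (p : List Char) : List Char :=
  PySem.Chars.upper (PySem.Chars.slice p (some 0) (some 1)) ++ PySem.Chars.slice p (some 1) none

theorem pvSpl_space (t : List Char) : pvSpl (' ' :: t) = [] :: pvSpl t := by simp [pvSpl]

theorem pvSpl_char {c : Char} (t : List Char) (hc : c ≠ ' ') :
    pvSpl (c :: t) = (pvSpl t).modifyHead (c :: ·) := by simp [pvSpl, hc]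

theorem pvG_space (flag : Bool) (t : List Char) : pvG flag (' ' :: t) = pvG true t := by
  simp [pvG]

theorem pvG_char {c : Char} (flag : Bool) (t : List Char) (hc : c ≠ ' ') :
    pvG flag (c :: t) = (if flag then PySem.Chars.upper [c] else [c]) ++ pvG false t := by
  cases flag <;> simp [pvG, hc]

theorem pvUpF_nil : pvUpF [] = [] := by
  simp [pvUpF, PySem.Chars.slice, PySem.List.slice_from ([] : List Char) (a := 1) (by norm_num),
    PySem.List.slice_toNat ([] : List Char) (a := 0) (b := 1) (by norm_num) (by norm_num), PySem.Chars.upper]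

theorem pvUpF_cons (c : Char) (p : List Char) : pvUpF (c :: p) = PySem.Chars.upper [c] ++ p := by
  simp [pvUpF, PySem.Chars.slice, PySem.List.slice_from (c :: p) (a := 1) (by norm_num),
    PySem.List.slice_toNat (c :: p) (a := 0) (b := 1) (by norm_num) (by norm_num)]

theorem pvJoin_flatten (l : List (List Char)) : PySem.Chars.join [] l = l.flatten := by
  simp only [PySem.Chars.join, List.intercalate]
  induction l with
  | nil => simp
  | cons h t ih => cases t <;> simp_all

theorem pvSpl_ne_nil (l : List Char) : pvSpl l ≠ [] := by
  induction l with
  | nil => simp [pvSpl]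
  | cons c t ih =>
      by_cases hc : c = ' '
      · subst hc; simp [pvSpl_space]
      · rw [pvSpl_char t hc]
        cases hs : pvSpl t with
        | nil => exact absurd hs ih
        | cons p ps => simp

theorem pvGo_eq (l : List Char) : ∀ (fuel : Nat) (cur : List Char) (acc : List (List Char)),
    l.length < fuel →
    PySem.Chars.splitOn.go [' '] fuel l cur acc
      = acc.reverse ++ (pvSpl l).modifyHead (cur.reverse ++ ·) := by
  induction l with
  | nil =>
      intro fuel cur acc h
      cases fuel with
      | zero => omega
      | succ f => simp [PySem.Chars.splitOn.go, pvSpl]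
  | cons c t ih =>
      intro fuel cur acc h
      cases fuel with
      | zero => omega
      | succ f =>
        by_cases hc : c = ' '
        · subst hc
          simp only [PySem.Chars.splitOn.go]
          rw [if_pos (by simp [List.isPrefixOf])]
          simp only [List.length_singleton, List.drop_one, List.tail_cons]
          rw [ih f [] (cur.reverse :: acc) (by simp at h; omega), pvSpl_space]
          cases pvSpl t <;> simp
        · simp only [PySem.Chars.splitOn.go]
          rw [if_neg (by simp [List.isPrefixOf]; exact fun hh => hc hh.symm)]
          rw [ih f (c :: cur) acc (by simp at h; omega)]
          rw [pvSpl_char t hc]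
          cases hs : pvSpl t with
          | nil => exact absurd hs (pvSpl_ne_nil t)
          | cons p ps => simp

theorem pvSplitOn_eq (l : List Char) : PySem.Chars.splitOn l [' '] = pvSpl l := by
  rw [PySem.Chars.splitOn, pvGo_eq l (l.length + 1) [] [] (by omega)]
  cases hs : pvSpl l <;> simp

theorem pvA_loop (l : List Char) : ∀ (res : List Char) (flag : Bool),
    (l.foldl (fun (st : List Char × Bool) ele =>
      if ele = ' ' then (st.1, true)
      else if st.2 then (st.1 ++ PySem.Chars.upper [ele], false)
      else (st.1 ++ [ele], st.2)) (res, flag)).1 = res ++ pvG flag l := by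
  induction l with
  | nil => intro res flag; simp [pvG]
  | cons c t ih =>
      intro res flag
      by_cases hc : c = ' '
      · subst hc; simp [pvG_space, ih]
      · cases flag <;> simp [pvG_char _ _ hc, hc, ih]

theorem pvB_eq_g (l : List Char) :
    (pvSpl l).headD [] ++ (((pvSpl l).drop 1).map pvUpF).flatten = pvG false l
    ∧ ((pvSpl l).map pvUpF).flatten = pvG true l := by
  induction l with
  | nil => simp [pvSpl, pvG, pvUpF_nil]
  | cons c t ih =>
      obtain ⟨p, ps, hs⟩ := List.exists_cons_of_ne_nil (pvSpl_ne_nil t)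
      have h1 := ih.1
      have h2 := ih.2
      rw [hs] at h1 h2
      simp only [List.headD_cons, List.drop_one, List.tail_cons, List.map_cons,
        List.flatten_cons] at h1 h2
      by_cases hc : c = ' '
      · subst hc
        rw [pvSpl_space, pvG_space]
        constructor
        · simpa [hs] using ih.2
        · simp only [List.map_cons, List.flatten_cons, pvUpF_nil, List.nil_append]
          exact ih.2
      · rw [pvSpl_char t hc, pvG_char false t hc, pvG_char true t hc, hs]
        constructor
        · simpa using h1
        · simp only [List.modifyHead_cons, List.map_cons, List.flatten_cons, pvUpF_cons, List.append_assoc]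
          rw [← h1]
          simp

-- ===== VERDICT (by name: the statement is the Claim_ definition above) =====
theorem camecase_conversion_spec : Claim_equal_camecase_conversion := by
  intro s _
  show camecase_conversion s = camecase_conversion_alt s
  unfold camecase_conversion camecase_conversion_alt
  rw [pvA_loop s.toList [] false, pvSplitOn_eq, pvJoin_flatten]
  exact congrArg String.ofList (by simpa using (pvB_eq_g s.toList).1.symm)
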